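-- pv_equiv track=rewrite | github.com/kryzthov/python-base | src/main/python/workflow/workflow.py | _maximize_dep_map
-- ===== SOURCE A (Python) =====
-- def _maximize_dep_map(dep_map):
--     """Materialize all transitive dependencies as direct dependencies.
--
--     Args:
--         dep_map: Original dependency map.
--             Map: source -> set of dependencies
--     Returns:
--         Maximized dependency map.
--     """
--     dep_map = dict(dep_map)  # Prevent mutating the original dependency map
--
--     # Map: source -> maximized set of dependencies
--     transitive = dict()
--
--     # Seed the transitive map with nodes that have no dependencies:
--     for dests in dep_map.values():
--         for dest in dests:
--             if dest not in dep_map: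
--                 transitive[dest] = frozenset()
--
--     while len(dep_map) > 0:
--         # Set of sources that are maximized in this iteration:
--         done = set()
--
--         for src, dests in dep_map.items():
--             # Can we compute the transitive dependencies of src now?
--             if len(dests.difference(transitive.keys())) > 0:
--                 # No, skip src for this iteration...
--                 continue
--
--             # Yes, compute src's transitive dependencies:
--             done.add(src)
--
--             full_dests = set(dests)
--             for dest in dests:
--                 full_dests.update(transitive[dest])
--
--             transitive[src] = full_dests
--
--         assert not ((len(done) == 0) and (len(dep_map) > 0)), ("Invalid dependency map?")
--
--         for src in done:
--             del dep_map[src]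
--
--     return transitive
-- ===== SOURCE B (Python) =====
-- def _maximize_dep_map(dep_map):
--     """Materialize all transitive dependencies as direct dependencies.
--
--     Round-based relaxation with pending-dependency counters: every node
--     that is not itself a source is seeded with an empty dependency set;
--     each round resolves the sources whose counter of unresolved
--     dependencies has reached zero, and resolving a source decrements the
--     counters of the sources that depend on it, so readiness is a
--     constant-time test instead of a recomputed set difference.
--     """
--     transitive = {}
--     for dests in dep_map.values():
--         for dest in dests:
--             if dest not in dep_map:
--                 transitive[dest] = frozenset()
--
--     pending = {}
--     dependents = {src: [] for src in dep_map}
--     for src, dests in dep_map.items():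
--         inner = {dest for dest in dests if dest in dep_map}
--         pending[src] = len(inner)
--         for dest in inner:
--             dependents[dest].append(src)
--
--     remaining = list(dep_map)
--     while remaining:
--         still = []
--         for src in remaining:
--             if pending[src]:
--                 still.append(src)
--                 continue
--             full = set(dep_map[src])
--             for dest in dep_map[src]:
--                 full.update(transitive[dest])
--             transitive[src] = frozenset(full)
--             for w in dependents[src]:
--                 pending[w] -= 1
--         assert len(still) < len(remaining), "Invalid dependency map?"
--         remaining = still
--     return transitive
-- ===== Notes on version B (the rewrite author's own statement) =====
-- stated objective: faster
-- what changed: Replaces the per-round set-difference readiness test on every remaining source with pending-dependency counters maintained incrementally through dependents adjacency lists (each edge is counted and decremented once), and tracks the still-unresolved sources in a list instead of deleting from the dict; Pre_ excludes cyclic dependency maps, on which A's assert raises AssertionError.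
import Mathlib
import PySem

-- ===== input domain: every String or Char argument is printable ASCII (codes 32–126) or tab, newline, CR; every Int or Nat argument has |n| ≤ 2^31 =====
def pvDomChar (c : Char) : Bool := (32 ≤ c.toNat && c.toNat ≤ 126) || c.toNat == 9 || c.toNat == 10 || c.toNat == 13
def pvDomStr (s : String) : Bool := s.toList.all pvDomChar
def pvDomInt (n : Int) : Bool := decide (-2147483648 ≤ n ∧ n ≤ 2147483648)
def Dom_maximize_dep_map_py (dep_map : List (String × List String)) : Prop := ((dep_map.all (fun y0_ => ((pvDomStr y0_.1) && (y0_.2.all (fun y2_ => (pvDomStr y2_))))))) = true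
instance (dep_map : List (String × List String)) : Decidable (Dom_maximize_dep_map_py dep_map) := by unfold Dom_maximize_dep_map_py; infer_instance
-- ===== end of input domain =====

-- B replaces A's per-round set-difference readiness tests by pending-dependency counters
-- (decremented through dependents lists), a constant-factor speedup; proved by a lockstep
-- simulation of the two round loops.


-- ===== PORT A =====
-- the dict passed to the function (A additionally copies it with 'dict(dep_map)')
def pvToDict (dep_map : List (String × List String)) : PySem.Dict String (List String) :=
  dep_map.foldl (fun d p => d.insert p.1 p.2) PySem.Dict.empty

-- 'for dests in dep_map.values(): for dest in dests: if dest not in dep_map: transitive[dest] = frozenset()'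
-- (this seeding loop is textually the same in A and in B)
def pvSeed (d : PySem.Dict String (List String)) : PySem.Dict String (List String) :=
  d.values.foldl (fun t dests =>
      dests.foldl (fun t dest => if d.contains dest then t else t.insert dest []) t)
    PySem.Dict.empty

-- 'full = set(dests); for dest in dests: full.update(transitive[dest])'
-- (this union loop too is the same statement sequence in A and in B)
def pvFullA (t : PySem.Dict String (List String)) (dests : List String) : List String :=
  dests.foldl (fun full dest => PySem.Set.update full (t.getD dest [])) (PySem.Set.ofList dests)

-- one 'for src, dests in dep_map.items():' scan of A's while body; state = (done, transitive)
def pvRoundA (t : PySem.Dict String (List String)) (itms : List (String × List String)) :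
    PySem.Set String × PySem.Dict String (List String) :=
  itms.foldl (fun acc p =>
      if 0 < (PySem.Set.diff (PySem.Set.ofList p.2) acc.2.keys).length then acc
      else (PySem.Set.add acc.1 p.1, acc.2.insert p.1 (pvFullA acc.2 p.2)))
    (PySem.Set.empty, t)

-- 'while len(dep_map) > 0': every pass deletes at least one source, so fuel = number of
-- sources suffices; when the 'assert' fires Python raises (outside Pre_) and the port
-- just returns the current table.
def pvLoopA (fuel : Nat) (dm t : PySem.Dict String (List String)) :
    PySem.Dict String (List String) :=
  match fuel with
  | 0 => t
  | fuel + 1 =>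
    if 0 < dm.size then
      let r := pvRoundA t dm.items
      if r.1.length = 0 then r.2
      else pvLoopA fuel (r.1.foldl (fun dm' src => dm'.erase src) dm) r.2
    else t

def maximize_dep_map_py (dep_map : List (String × List String)) : List (String × List String) :=
  let d := pvToDict dep_map
  let transitive := pvSeed d
  (pvLoopA d.size d transitive).items

-- ===== PORT B =====
-- 'inner = {dest for dest in dests if dest in dep_map}'  (the set's iteration order is
-- consumed only by its length and by appends to per-key lists, so any order is exact)
def pvInner (d : PySem.Dict String (List String)) (dests : List String) : List String :=
  PySem.Set.ofList (dests.filter (fun x => d.contains x))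

-- 'pending = {}; dependents = {src: [] for src in dep_map}; for src, dests in dep_map.items(): …'
def pvInitB (d : PySem.Dict String (List String)) :
    PySem.Dict String Int × PySem.Dict String (List String) :=
  d.items.foldl (fun acc p =>
      (acc.1.insert p.1 ((pvInner d p.2).length : Int),
       (pvInner d p.2).foldl (fun dep x => dep.modify x [] (· ++ [p.1])) acc.2))
    (PySem.Dict.empty, d.keys.foldl (fun dep s => dep.insert s []) PySem.Dict.empty)

-- one 'for src in remaining:' scan of B's while body; state = (still, pending, transitive)
def pvRoundB (d dependents : PySem.Dict String (List String)) (remaining : List String)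
    (pending : PySem.Dict String Int) (t : PySem.Dict String (List String)) :
    List String × PySem.Dict String Int × PySem.Dict String (List String) :=
  remaining.foldl (fun acc src =>
      if acc.2.1.getD src 0 ≠ 0 then (acc.1 ++ [src], acc.2)
      else (acc.1,
            (dependents.getD src []).foldl (fun pnd w => pnd.modify w 0 (· - 1)) acc.2.1,
            acc.2.2.insert src (pvFullA acc.2.2 (d.getD src []))))
    ([], pending, t)

-- 'while remaining:' — every pass strictly shrinks remaining, so fuel = number of sources
-- suffices; when the 'assert' fires Python raises (outside Pre_).
def pvLoopB (d dependents : PySem.Dict String (List String)) (fuel : Nat)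
    (remaining : List String) (pending : PySem.Dict String Int)
    (t : PySem.Dict String (List String)) : PySem.Dict String (List String) :=
  match fuel with
  | 0 => t
  | fuel + 1 =>
    if remaining.length ≠ 0 then
      let r := pvRoundB d dependents remaining pending t
      if r.1.length < remaining.length then pvLoopB d dependents fuel r.1 r.2.1 r.2.2
      else r.2.2
    else t

def maximize_dep_map_py_alt (dep_map : List (String × List String)) : List (String × List String) :=
  let d := pvToDict dep_map
  let transitive := pvSeed d
  let init := pvInitB d
  (pvLoopB d init.2 d.size d.keys init.1 transitive).items

-- ===== PRECONDITION & SPEC =====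
-- Pre_ excludes exactly the inputs whose source-to-source dependency graph has a cycle:
-- there A's 'assert' raises AssertionError (and B's does too); on every acyclic input A returns.
def Pre_maximize_dep_map_py (dep_map : List (String × List String)) : Prop :=
  ∀ S ∈ (PySem.Set.ofList (dep_map.map Prod.fst)).sublists, S ≠ [] →
    ∃ src ∈ S, ∀ dst ∈ (PySem.Dict.ofList dep_map).getD src [], dst ∉ S
instance (dep_map : List (String × List String)) : Decidable (Pre_maximize_dep_map_py dep_map) := by
  unfold Pre_maximize_dep_map_py; infer_instance

def pvWitness_maximize_dep_map_py : (List (String × List String)) :=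
  [("a", ["b", "c"]), ("b", ["c"]), ("x", ["a"])]

def Spec_maximize_dep_map_py (dep_map : List (String × List String)) (out : List (String × List String)) : Prop := out = maximize_dep_map_py_alt dep_map
instance (dep_map : List (String × List String)) (out : List (String × List String)) : Decidable (Spec_maximize_dep_map_py dep_map out) := by unfold Spec_maximize_dep_map_py; infer_instance

-- ===== CLAIM (what is proved, stated in full; the proofs are below) =====
def Claim_equal_maximize_dep_map_py : Prop := ∀ (dep_map : List (String × List String)), Dom_maximize_dep_map_py dep_map → Pre_maximize_dep_map_py dep_map → Spec_maximize_dep_map_py dep_map (maximize_dep_map_py dep_map)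

-- ===== LEMMAS AND PROOFS =====
-- pvToDict facts
theorem pvToDict_eq_ofList (l : List (String × List String)) :
    pvToDict l = PySem.Dict.ofList l := rfl

theorem pvToDict_keys_nodup (l : List (String × List String)) :
    (pvToDict l).keys.Nodup := by
  rw [pvToDict_eq_ofList]; exact PySem.Dict.nodup_keys_ofList _

-- key/value lookup of an item
theorem pv_item_getD (d : PySem.Dict String (List String)) (hnd : d.keys.Nodup)
    (p : String × List String) (hp : p ∈ d.items) : d.getD p.1 [] = p.2 :=
  PySem.Dict.getD_of_mem_items d (by exact hp) hnd []

theorem pv_item_contains (d : PySem.Dict String (List String))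
    (p : String × List String) (hp : p ∈ d.items) : d.contains p.1 = true := by
  rw [PySem.Dict.contains_iff_mem_keys]
  exact List.mem_map.2 ⟨p, hp, rfl⟩

theorem pv_items_eq_map (d : PySem.Dict String (List String)) (hnd : d.keys.Nodup) :
    d.items = d.keys.map (fun k => (k, d.getD k [])) := by
  show d.items = (d.items.map Prod.fst).map (fun k => (k, d.getD k []))
  rw [List.map_map]
  refine ((List.map_congr_left ?_).trans (List.map_id d.items)).symm
  intro p hp
  show (p.1, d.getD p.1 []) = p
  rw [pv_item_getD d hnd p hp]

-- pvSeed facts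
def pvFlat (d : PySem.Dict String (List String)) : List String := d.values.flatMap (fun v => v)

def pvSeedF (d : PySem.Dict String (List String)) (t : PySem.Dict String (List String))
    (l : List String) : PySem.Dict String (List String) :=
  l.foldl (fun t dest => if d.contains dest then t else t.insert dest []) t

theorem pvSeedF_flat (d : PySem.Dict String (List String)) (vs : List (List String))
    (t0 : PySem.Dict String (List String)) :
    vs.foldl (fun t dests =>
        dests.foldl (fun t dest => if d.contains dest then t else t.insert dest []) t) t0 =
      pvSeedF d t0 (vs.flatMap (fun v => v)) := by
  induction vs generalizing t0 with
  | nil => simp [pvSeedF]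
  | cons a r ih => simp [pvSeedF, List.foldl_append, ih]

theorem pvSeed_eq_flat (d : PySem.Dict String (List String)) :
    pvSeed d = pvSeedF d PySem.Dict.empty (pvFlat d) := pvSeedF_flat d d.values _

theorem pvSeedF_cons (d t : PySem.Dict String (List String)) (a : String) (r : List String) :
    pvSeedF d t (a :: r) =
      if d.contains a = true then pvSeedF d t r else pvSeedF d (t.insert a []) r := by
  simp only [pvSeedF, List.foldl_cons]; split <;> rfl

theorem pvSeedF_mem_keys (d t : PySem.Dict String (List String)) (l : List String) (x : String) :
    x ∈ (pvSeedF d t l).keys ↔ x ∈ t.keys ∨ (d.contains x = false ∧ x ∈ l) := by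
  induction l generalizing t with
  | nil => simp [pvSeedF]
  | cons a r ih =>
    rw [pvSeedF_cons]
    split
    · rename_i hc
      rw [ih t]
      constructor
      · rintro (h | h); · exact Or.inl h
        · exact Or.inr ⟨h.1, List.mem_cons_of_mem _ h.2⟩
      · rintro (h | ⟨h1, h2⟩); · exact Or.inl h
        · rcases List.mem_cons.1 h2 with rfl | h2
          · rw [hc] at h1; cases h1
          · exact Or.inr ⟨h1, h2⟩
    · rename_i hc
      rw [ih (t.insert a [])]
      rw [Bool.not_eq_true] at hc
      constructor
      · rintro (h | h)
        · rcases (PySem.Dict.mem_keys_insert _ _ _ _).1 h with rfl | h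
          · exact Or.inr ⟨hc, by simp⟩
          · exact Or.inl h
        · exact Or.inr ⟨h.1, List.mem_cons_of_mem _ h.2⟩
      · rintro (h | ⟨h1, h2⟩)
        · exact Or.inl ((PySem.Dict.mem_keys_insert _ _ _ _).2 (Or.inr h))
        · rcases List.mem_cons.1 h2 with rfl | h2
          · exact Or.inl ((PySem.Dict.mem_keys_insert _ _ _ _).2 (Or.inl rfl))
          · exact Or.inr ⟨h1, h2⟩

theorem pvSeedF_nodup (d t : PySem.Dict String (List String)) (l : List String)
    (ht : t.keys.Nodup) : (pvSeedF d t l).keys.Nodup := by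
  induction l generalizing t with
  | nil => exact ht
  | cons a r ih =>
    rw [pvSeedF_cons]
    split
    · exact ih t ht
    · exact ih _ (PySem.Dict.nodup_keys_insert _ _ _ ht)

theorem pvSeed_mem_keys (d : PySem.Dict String (List String)) (x : String) :
    x ∈ (pvSeed d).keys ↔ d.contains x = false ∧ x ∈ pvFlat d := by
  rw [pvSeed_eq_flat, pvSeedF_mem_keys]; simp [PySem.Dict.keys_empty]

theorem pvSeed_nodup (d : PySem.Dict String (List String)) : (pvSeed d).keys.Nodup := by
  rw [pvSeed_eq_flat]; exact pvSeedF_nodup _ _ _ PySem.Dict.nodup_keys_empty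

theorem pv_mem_flat (d : PySem.Dict String (List String)) (p : String × List String)
    (hp : p ∈ d.items) (dst : String) (hd : dst ∈ p.2) : dst ∈ pvFlat d := by
  unfold pvFlat
  exact List.mem_flatMap.2 ⟨p.2, List.mem_map.2 ⟨p, hp, rfl⟩, hd⟩

-- pvInner facts
theorem pv_mem_inner (d : PySem.Dict String (List String)) (v : List String) (x : String) :
    x ∈ pvInner d v ↔ x ∈ v ∧ d.contains x = true := by
  unfold pvInner
  rw [PySem.Set.mem_ofList, List.mem_filter]

theorem pv_inner_nodup (d : PySem.Dict String (List String)) (v : List String) :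
    (pvInner d v).Nodup := PySem.Set.nodup_ofList _

-- splitting pvInitB into its two independent folds
def pvNpB (d : PySem.Dict String (List String)) : PySem.Dict String Int :=
  d.items.foldl (fun np p => np.insert p.1 ((pvInner d p.2).length : Int)) PySem.Dict.empty

def pvPrefill (d : PySem.Dict String (List String)) : PySem.Dict String (List String) :=
  d.keys.foldl (fun dep s => dep.insert s []) PySem.Dict.empty

def pvDepB (d : PySem.Dict String (List String)) : PySem.Dict String (List String) :=
  d.items.foldl (fun dep p =>
    (pvInner d p.2).foldl (fun dep x => dep.modify x [] (· ++ [p.1])) dep) (pvPrefill d)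

theorem pvInitB_eq (d : PySem.Dict String (List String)) :
    pvInitB d = (pvNpB d, pvDepB d) := by
  unfold pvInitB pvNpB pvDepB pvPrefill
  exact PySem.List.foldl_prod_mk
    (fun (np : PySem.Dict String Int) (p : String × List String) =>
      np.insert p.1 ((pvInner d p.2).length : Int))
    (fun (dep : PySem.Dict String (List String)) (p : String × List String) =>
      (pvInner d p.2).foldl (fun dep x => dep.modify x [] (· ++ [p.1])) dep) _ _ _

theorem pvNpB_getD (d : PySem.Dict String (List String)) (hnd : d.keys.Nodup)
    (p : String × List String) (hp : p ∈ d.items) :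
    (pvNpB d).getD p.1 0 = ((pvInner d p.2).length : Int) := by
  have hitems : (pvNpB d).items = d.items.map (fun p => (p.1, ((pvInner d p.2).length : Int))) := by
    unfold pvNpB
    have := PySem.Dict.items_foldl_insert_fresh d.items Prod.fst
      (fun p => ((pvInner d p.2).length : Int)) PySem.Dict.empty
      (fun a _ => PySem.Dict.contains_empty _) hnd
    simpa using this
  have hkeys : (pvNpB d).keys = d.keys := by
    show (pvNpB d).items.map Prod.fst = _
    rw [hitems, List.map_map]; rfl
  refine PySem.Dict.getD_of_mem_items _ ?_ (by rw [hkeys]; exact hnd) 0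
  rw [hitems]
  exact List.mem_map.2 ⟨p, hp, rfl⟩

-- the dependents table
theorem pv_modify_inner (kd : List String) (hnd : kd.Nodup) (s : String)
    (t : PySem.Dict String (List String)) (x : String) :
    (kd.foldl (fun t y => t.modify y [] (· ++ [s])) t).getD x [] =
      t.getD x [] ++ (if x ∈ kd then [s] else []) := by
  induction kd generalizing t with
  | nil => simp
  | cons y r ih =>
    simp only [List.foldl_cons]
    rcases List.nodup_cons.1 hnd with ⟨hy, hr⟩
    by_cases hx : x = y
    · subst hx
      rw [ih hr, if_neg hy, if_pos (by simp), PySem.Dict.getD_modify_self]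
      simp
    · rw [ih hr, PySem.Dict.getD_modify_of_ne _ _ _ hx]
      by_cases hxr : x ∈ r
      · rw [if_pos hxr, if_pos (by simp [hxr])]
      · rw [if_neg hxr, if_neg (by simp [hxr, hx])]

theorem pvPrefill_getD (d : PySem.Dict String (List String)) (x : String) :
    (pvPrefill d).getD x [] = [] := by
  unfold pvPrefill
  rw [PySem.Dict.getD_eq_get?_getD]
  have : ∀ (l : List String) (t : PySem.Dict String (List String)),
      (∀ y, t.get? y = none ∨ t.get? y = some []) →
      ∀ y, (l.foldl (fun dep s => dep.insert s []) t).get? y = none ∨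
        (l.foldl (fun dep s => dep.insert s []) t).get? y = some [] := by
    intro l
    induction l with
    | nil => exact fun t ht => ht
    | cons a r ih =>
      intro t ht
      refine ih _ (fun y => ?_)
      by_cases hy : y = a
      · subst hy; right; exact PySem.Dict.get?_insert_self _ _ _
      · rw [PySem.Dict.get?_insert_of_ne _ _ hy]; exact ht y
  rcases this d.keys PySem.Dict.empty (fun y => Or.inl (PySem.Dict.get?_empty _)) x with h | h <;>
    rw [h] <;> rfl

theorem pvDepB_getD (d : PySem.Dict String (List String)) (x : String) :
    (pvDepB d).getD x [] =
      (d.items.filter (fun p => decide (x ∈ pvInner d p.2))).map Prod.fst := by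
  unfold pvDepB
  have : ∀ (l : List (String × List String)) (t : PySem.Dict String (List String)),
      (l.foldl (fun dep p =>
          (pvInner d p.2).foldl (fun dep x => dep.modify x [] (· ++ [p.1])) dep) t).getD x [] =
        t.getD x [] ++ (l.filter (fun p => decide (x ∈ pvInner d p.2))).map Prod.fst := by
    intro l
    induction l with
    | nil => simp
    | cons p r ih =>
      intro t
      simp only [List.foldl_cons]
      rw [ih, pv_modify_inner _ (pv_inner_nodup d p.2)]
      by_cases hx : x ∈ pvInner d p.2
      · rw [if_pos hx, List.filter_cons_of_pos (by simpa using hx)]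
        simp
      · rw [if_neg hx, List.filter_cons_of_neg (by simpa using hx)]
        simp
  rw [this d.items (pvPrefill d), pvPrefill_getD]
  rfl

theorem pv_mem_depB (d : PySem.Dict String (List String)) (hnd : d.keys.Nodup)
    (src w : String) :
    w ∈ (pvDepB d).getD src [] ↔
      d.contains w = true ∧ src ∈ pvInner d (d.getD w []) := by
  rw [pvDepB_getD]
  constructor
  · intro h
    obtain ⟨p, hp, rfl⟩ := List.mem_map.1 h
    rw [List.mem_filter] at hp
    refine ⟨pv_item_contains d p hp.1, ?_⟩
    rw [pv_item_getD d hnd p hp.1]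
    simpa using hp.2
  · rintro ⟨hw, hsrc⟩
    obtain ⟨p, hp, hfst⟩ := List.mem_map.1 ((PySem.Dict.contains_iff_mem_keys _ _).1 hw)
    refine List.mem_map.2 ⟨p, List.mem_filter.2 ⟨hp, ?_⟩, hfst⟩
    rw [← hfst, pv_item_getD d hnd p hp] at hsrc
    simpa using hsrc

theorem pv_depB_nodup (d : PySem.Dict String (List String)) (hnd : d.keys.Nodup)
    (src : String) : ((pvDepB d).getD src []).Nodup := by
  rw [pvDepB_getD]
  have hsub : ((d.items.filter (fun p => decide (src ∈ pvInner d p.2))).map Prod.fst).Sublist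
      (d.items.map Prod.fst) := (List.filter_sublist).map _
  exact List.Nodup.sublist hsub hnd

-- the fold of decrements 'for w in dependents[src]: pending[w] -= 1'
theorem pv_dec_fold (ws : List String) (hnd : ws.Nodup) (p : PySem.Dict String Int) (x : String) :
    (ws.foldl (fun pnd w => pnd.modify w 0 (· - 1)) p).getD x 0 =
      p.getD x 0 - (if x ∈ ws then 1 else 0) := by
  induction ws generalizing p with
  | nil => simp
  | cons w r ih =>
    rcases List.nodup_cons.1 hnd with ⟨hw, hr⟩
    simp only [List.foldl_cons]
    rw [ih hr]
    by_cases hx : x = w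
    · subst hx
      rw [PySem.Dict.getD_modify_self, if_neg hw, if_pos (by simp)]
      omega
    · rw [PySem.Dict.getD_modify_of_ne _ _ _ hx]
      by_cases hxr : x ∈ r
      · rw [if_pos hxr, if_pos (by simp [hxr])]
      · rw [if_neg hxr, if_neg (by simp [hxr, hx])]

-- diff length as a filter length
theorem pv_diff_len (s L : List String) (hs : s.Nodup) :
    (PySem.Set.diff s L).length = (s.filter (fun x => decide (x ∉ L))).length := by
  refine List.Perm.length_eq ?_
  refine (List.perm_ext_iff_of_nodup (show (PySem.Set.diff s L).Nodup from hs.filter _)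
    (hs.filter _)).2 ?_
  intro a
  rw [PySem.Set.mem_diff, List.mem_filter]
  simp

-- splitting a filter count at a fresh key
theorem pv_filter_len_split (l : List String) (hnd : l.Nodup) (o : List String) (s : String)
    (hs : s ∉ o) :
    ((l.filter (fun x => decide (x ∉ o))).length : Int) =
      ((l.filter (fun x => decide (x ∉ o ++ [s]))).length : Int) +
        (if s ∈ l then 1 else 0) := by
  induction l with
  | nil => simp
  | cons a r ih =>
    rcases List.nodup_cons.1 hnd with ⟨ha, hr⟩
    have ihr := ih hr
    by_cases h2 : a = s
    · subst h2
      rw [List.filter_cons_of_pos (by simpa using hs), List.filter_cons_of_neg (by simp),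
        if_pos (List.mem_cons_self), List.length_cons]
      rw [if_neg ha] at ihr
      push_cast at ihr ⊢
      omega
    · have hif : (if s ∈ a :: r then (1:Int) else 0) = (if s ∈ r then 1 else 0) := by
        have : (s ∈ a :: r) ↔ s ∈ r := by
          rw [List.mem_cons]
          exact ⟨fun h => h.elim (fun h' => absurd h'.symm h2) id, Or.inr⟩
        rw [if_congr this rfl rfl]
      rw [hif]
      by_cases h1 : a ∈ o
      · rw [List.filter_cons_of_neg (by simpa using h1),
          List.filter_cons_of_neg (by simp [h1])]
        exact ihr
      · rw [List.filter_cons_of_pos (by simpa using h1),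
          List.filter_cons_of_pos (by simp [h1, h2]), List.length_cons, List.length_cons]
        by_cases h3 : s ∈ r
        · rw [if_pos h3] at ihr ⊢; push_cast at ihr ⊢; omega
        · rw [if_neg h3] at ihr ⊢; push_cast at ihr ⊢; omega

-- erasing the finished sources
theorem pv_items_foldl_erase (l : List String) (dm : PySem.Dict String (List String)) :
    (l.foldl (fun dm k => dm.erase k) dm).items =
      dm.items.filter (fun p => decide (p.1 ∉ l)) := by
  induction l generalizing dm with
  | nil =>
    rw [List.foldl_nil]
    conv_lhs => rw [show dm.items = dm.items.filter (fun _ => true) from (List.filter_true _).symm]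
    exact List.filter_congr (fun p _ => by simp)
  | cons a r ih =>
    rw [List.foldl_cons, ih]
    show (dm.items.filter (fun p => !(p.1 == a))).filter (fun p => decide (p.1 ∉ r)) = _
    rw [List.filter_filter]
    refine List.filter_congr (fun p _ => ?_)
    by_cases h1 : p.1 = a <;> by_cases h2 : p.1 ∈ r <;> simp [h1, h2]

-- unfolding the two loops one step
theorem pvLoopA_succ (fuel : Nat) (dm t : PySem.Dict String (List String)) :
    pvLoopA (fuel + 1) dm t =
      if 0 < dm.size then
        (if (pvRoundA t dm.items).1.length = 0 then (pvRoundA t dm.items).2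
         else pvLoopA fuel ((pvRoundA t dm.items).1.foldl (fun dm' src => dm'.erase src) dm)
           (pvRoundA t dm.items).2)
      else t := rfl

theorem pvLoopB_succ (d dependents : PySem.Dict String (List String)) (fuel : Nat)
    (remaining : List String) (pending : PySem.Dict String Int)
    (t : PySem.Dict String (List String)) :
    pvLoopB d dependents (fuel + 1) remaining pending t =
      if remaining.length ≠ 0 then
        (if (pvRoundB d dependents remaining pending t).1.length < remaining.length then
          pvLoopB d dependents fuel (pvRoundB d dependents remaining pending t).1
            (pvRoundB d dependents remaining pending t).2.1
            (pvRoundB d dependents remaining pending t).2.2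
         else (pvRoundB d dependents remaining pending t).2.2)
      else t := rfl

-- the count of unresolved dependencies of k against table t
def pvCnt (d t : PySem.Dict String (List String)) (k : String) : Int :=
  (((PySem.Set.ofList (d.getD k [])).filter (fun x => decide (x ∉ t.keys))).length : Int)

-- ===== the lockstep simulation of one round =====
theorem pvRoundSim (d dep : PySem.Dict String (List String))
    (hdep_mem : ∀ src w, w ∈ dep.getD src [] ↔
      d.contains w = true ∧ src ∈ pvInner d (d.getD w []))
    (hdep_nd : ∀ src, (dep.getD src []).Nodup) :
    ∀ (ks done still : List String) (pending : PySem.Dict String Int)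
      (t : PySem.Dict String (List String)),
    (still ++ ks).Nodup →
    (∀ k ∈ still ++ ks, d.contains k = true) →
    (∀ k ∈ still ++ ks, k ∉ t.keys) →
    (∀ k ∈ still ++ ks, pending.getD k 0 = pvCnt d t k) →
    (∀ x ∈ pvFlat d, d.contains x = false → x ∈ t.keys) →
    t.keys.Nodup →
    (∀ k ∈ ks, k ∉ done) →
    (ks.foldl (fun acc k =>
        if 0 < (PySem.Set.diff (PySem.Set.ofList (d.getD k [])) acc.2.keys).length then acc
        else (PySem.Set.add acc.1 k, acc.2.insert k (pvFullA acc.2 (d.getD k []))))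
      (done, t)).2 =
      (ks.foldl (fun acc src =>
        if acc.2.1.getD src 0 ≠ 0 then (acc.1 ++ [src], acc.2)
        else (acc.1,
              (dep.getD src []).foldl (fun pnd w => pnd.modify w 0 (· - 1)) acc.2.1,
              acc.2.2.insert src (pvFullA acc.2.2 (d.getD src []))))
      (still, pending, t)).2.2 ∧
    (ks.foldl (fun acc src =>
        if acc.2.1.getD src 0 ≠ 0 then (acc.1 ++ [src], acc.2)
        else (acc.1,
              (dep.getD src []).foldl (fun pnd w => pnd.modify w 0 (· - 1)) acc.2.1,
              acc.2.2.insert src (pvFullA acc.2.2 (d.getD src []))))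
      (still, pending, t)).1 =
      still ++ ks.filter (fun k => decide (k ∉
        (ks.foldl (fun acc k =>
          if 0 < (PySem.Set.diff (PySem.Set.ofList (d.getD k [])) acc.2.keys).length then acc
          else (PySem.Set.add acc.1 k, acc.2.insert k (pvFullA acc.2 (d.getD k []))))
        (done, t)).1)) ∧
    (ks.foldl (fun acc k =>
        if 0 < (PySem.Set.diff (PySem.Set.ofList (d.getD k [])) acc.2.keys).length then acc
        else (PySem.Set.add acc.1 k, acc.2.insert k (pvFullA acc.2 (d.getD k []))))
      (done, t)).1.length +
      (ks.foldl (fun acc src =>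
        if acc.2.1.getD src 0 ≠ 0 then (acc.1 ++ [src], acc.2)
        else (acc.1,
              (dep.getD src []).foldl (fun pnd w => pnd.modify w 0 (· - 1)) acc.2.1,
              acc.2.2.insert src (pvFullA acc.2.2 (d.getD src []))))
      (still, pending, t)).1.length = done.length + still.length + ks.length ∧
    (∀ k ∈ (ks.foldl (fun acc src =>
        if acc.2.1.getD src 0 ≠ 0 then (acc.1 ++ [src], acc.2)
        else (acc.1,
              (dep.getD src []).foldl (fun pnd w => pnd.modify w 0 (· - 1)) acc.2.1,
              acc.2.2.insert src (pvFullA acc.2.2 (d.getD src []))))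
      (still, pending, t)).1,
      (ks.foldl (fun acc src =>
        if acc.2.1.getD src 0 ≠ 0 then (acc.1 ++ [src], acc.2)
        else (acc.1,
              (dep.getD src []).foldl (fun pnd w => pnd.modify w 0 (· - 1)) acc.2.1,
              acc.2.2.insert src (pvFullA acc.2.2 (d.getD src []))))
      (still, pending, t)).2.1.getD k 0 =
        pvCnt d (ks.foldl (fun acc k =>
          if 0 < (PySem.Set.diff (PySem.Set.ofList (d.getD k [])) acc.2.keys).length then acc
          else (PySem.Set.add acc.1 k, acc.2.insert k (pvFullA acc.2 (d.getD k []))))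
        (done, t)).2 k ∧
      k ∉ ((ks.foldl (fun acc k =>
          if 0 < (PySem.Set.diff (PySem.Set.ofList (d.getD k [])) acc.2.keys).length then acc
          else (PySem.Set.add acc.1 k, acc.2.insert k (pvFullA acc.2 (d.getD k []))))
        (done, t)).2).keys) ∧
    (∀ x ∈ pvFlat d, d.contains x = false → x ∈
      ((ks.foldl (fun acc k =>
          if 0 < (PySem.Set.diff (PySem.Set.ofList (d.getD k [])) acc.2.keys).length then acc
          else (PySem.Set.add acc.1 k, acc.2.insert k (pvFullA acc.2 (d.getD k []))))
        (done, t)).2).keys) ∧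
    ((ks.foldl (fun acc k =>
        if 0 < (PySem.Set.diff (PySem.Set.ofList (d.getD k [])) acc.2.keys).length then acc
        else (PySem.Set.add acc.1 k, acc.2.insert k (pvFullA acc.2 (d.getD k []))))
      (done, t)).2).keys.Nodup ∧
    (∀ x ∈ (ks.foldl (fun acc k =>
        if 0 < (PySem.Set.diff (PySem.Set.ofList (d.getD k [])) acc.2.keys).length then acc
        else (PySem.Set.add acc.1 k, acc.2.insert k (pvFullA acc.2 (d.getD k []))))
      (done, t)).1, x ∈ done ∨ x ∈ ks) ∧
    (∃ fin, (ks.foldl (fun acc k =>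
        if 0 < (PySem.Set.diff (PySem.Set.ofList (d.getD k [])) acc.2.keys).length then acc
        else (PySem.Set.add acc.1 k, acc.2.insert k (pvFullA acc.2 (d.getD k []))))
      (done, t)).1 = done ++ fin) := by
  intro ks
  induction ks with
  | nil =>
    intro done still pending t hnd hkeys hmemt hpend hseed htnd hdone
    refine ⟨rfl, by simp, by simp, ?_, hseed, htnd, fun x hx => Or.inl hx, ⟨[], by simp⟩⟩
    intro k hk
    simp only [List.foldl_nil]
    exact ⟨hpend k (by simpa using hk), hmemt k (by simpa using hk)⟩
  | cons k ks ih =>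
    intro done still pending t hnd hkeys hmemt hpend hseed htnd hdone
    have hkmem : k ∈ still ++ k :: ks := by simp
    have hkK : d.contains k = true := hkeys k hkmem
    have hknt : k ∉ t.keys := hmemt k hkmem
    have hkcnt : pending.getD k 0 = pvCnt d t k := hpend k hkmem
    have hknstill : k ∉ still := by
      intro h
      have := List.nodup_append.1 hnd
      exact this.2.2 k h k (by simp) rfl
    have hknks : k ∉ ks := by
      have h1 : (k :: ks).Nodup := (List.nodup_append.1 hnd).2.1
      exact (List.nodup_cons.1 h1).1
    have hdiff_len : (PySem.Set.diff (PySem.Set.ofList (d.getD k [])) t.keys).length =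
        ((PySem.Set.ofList (d.getD k [])).filter (fun x => decide (x ∉ t.keys))).length :=
      pv_diff_len _ _ (PySem.Set.nodup_ofList _)
    have htest : (0 < (PySem.Set.diff (PySem.Set.ofList (d.getD k [])) t.keys).length) ↔
        pending.getD k 0 ≠ 0 := by
      rw [hdiff_len, hkcnt]
      unfold pvCnt
      omega
    simp only [List.foldl_cons]
    by_cases hrdy : pending.getD k 0 ≠ 0
    · -- skipped: A keeps its state, B appends k to still
      rw [if_pos hrdy, if_pos (htest.2 hrdy)]
      have hperm : still ++ [k] ++ ks = still ++ (k :: ks) := by simp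
      obtain ⟨c1, c2, c3, c4, c5, c6, c7, c8⟩ := ih done (still ++ [k]) pending t
        (by rw [hperm]; exact hnd)
        (by rw [hperm]; exact hkeys)
        (by rw [hperm]; exact hmemt)
        (by rw [hperm]; exact hpend)
        hseed htnd
        (fun k' hk' => hdone k' (List.mem_cons_of_mem _ hk'))
      obtain ⟨fin, hfin⟩ := c8
      have hknA : k ∉ (ks.foldl (fun acc k =>
          if 0 < (PySem.Set.diff (PySem.Set.ofList (d.getD k [])) acc.2.keys).length then acc
          else (PySem.Set.add acc.1 k, acc.2.insert k (pvFullA acc.2 (d.getD k []))))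
          (done, t)).1 := by
        intro hmem
        rcases c7 k hmem with h | h
        · exact hdone k (by simp) h
        · exact hknks h
      refine ⟨c1, ?_, ?_, c4, c5, c6, ?_, ⟨fin, hfin⟩⟩
      · rw [c2, List.filter_cons_of_pos (by simpa using hknA)]
        simp
      · simp only [List.length_append, List.length_cons, List.length_nil] at c3 ⊢
        omega
      · intro x hx
        rcases c7 x hx with h | h
        · exact Or.inl h
        · exact Or.inr (List.mem_cons_of_mem _ h)
    · -- finalized: both insert the same entry; B decrements the dependents
      rw [if_neg hrdy, if_neg (fun h => hrdy (htest.1 h))]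
      have hkdone : k ∉ done := hdone k (by simp)
      have hadd : PySem.Set.add done k = done ++ [k] := PySem.Set.add_of_not_mem hkdone
      set t' := t.insert k (pvFullA t (d.getD k [])) with ht'
      have hkcb : t.contains k = false := by
        rw [← Bool.not_eq_true, PySem.Dict.contains_iff_mem_keys]
        exact hknt
      have htk' : t'.keys = t.keys ++ [k] :=
        PySem.Dict.keys_insert_of_not_contains _ _ hkcb
      have htnd' : t'.keys.Nodup := PySem.Dict.nodup_keys_insert _ _ _ htnd
      set pending' := (dep.getD k []).foldl (fun pnd w => pnd.modify w 0 (· - 1)) pending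
        with hpd'
      have hpd'_getD : ∀ x, pending'.getD x 0 =
          pending.getD x 0 - (if x ∈ dep.getD k [] then 1 else 0) :=
        fun x => pv_dec_fold _ (hdep_nd k) pending x
      have hperm2 : ∀ k', k' ∈ still ++ ks → k' ∈ still ++ k :: ks := by
        intro k' h
        rcases List.mem_append.1 h with h | h
        · exact List.mem_append_left _ h
        · exact List.mem_append_right _ (List.mem_cons_of_mem _ h)
      have hnd' : (still ++ ks).Nodup := by
        rw [List.nodup_append] at hnd ⊢
        refine ⟨hnd.1, (List.nodup_cons.1 hnd.2.1).2, ?_⟩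
        intro a ha b hb
        exact hnd.2.2 a ha b (List.mem_cons_of_mem _ hb)
      have hne_k : ∀ k', k' ∈ still ++ ks → k' ≠ k := by
        intro k' h heq
        subst heq
        rcases List.mem_append.1 h with h | h
        · exact hknstill h
        · exact hknks h
      obtain ⟨c1, c2, c3, c4, c5, c6, c7, c8⟩ := ih (done ++ [k]) still pending' t'
        hnd'
        (fun k' h => hkeys k' (hperm2 k' h))
        (by
          intro k' h
          rw [htk']
          intro hmem
          rcases List.mem_append.1 hmem with hm | hm
          · exact hmemt k' (hperm2 k' h) hm
          · exact hne_k k' h (List.mem_singleton.1 hm))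
        (by
          intro k' h
          rw [hpd'_getD k']
          have hdepiff : k' ∈ dep.getD k [] ↔ k ∈ d.getD k' [] := by
            rw [hdep_mem k k', pv_mem_inner]
            constructor
            · rintro ⟨_, h1, _⟩; exact h1
            · intro h1; exact ⟨hkeys k' (hperm2 k' h), h1, hkK⟩
          have hsplit := pv_filter_len_split (PySem.Set.ofList (d.getD k' []))
            (PySem.Set.nodup_ofList _) t.keys k hknt
          have hite : (if k ∈ PySem.Set.ofList (d.getD k' []) then (1:Int) else 0) =
              (if k ∈ d.getD k' [] then 1 else 0) := by
            by_cases hm : k ∈ d.getD k' []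
            · rw [if_pos hm, if_pos ((PySem.Set.mem_ofList _ _).2 hm)]
            · rw [if_neg hm, if_neg (fun hc => hm ((PySem.Set.mem_ofList _ _).1 hc))]
          have hcnt' : pvCnt d t' k' = pvCnt d t k' -
              (if k ∈ d.getD k' [] then 1 else 0) := by
            unfold pvCnt
            rw [htk', hsplit, hite]
            ring
          have hite2 : (if k' ∈ dep.getD k [] then (1:Int) else 0) =
              (if k ∈ d.getD k' [] then 1 else 0) := by
            by_cases hm : k ∈ d.getD k' []
            · rw [if_pos hm, if_pos (hdepiff.2 hm)]
            · rw [if_neg hm, if_neg (fun hc => hm (hdepiff.1 hc))]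
          rw [hcnt', ← hpend k' (hperm2 k' h), hite2]
        )
        (by
          intro x hx hcx
          rw [htk']
          exact List.mem_append_left _ (hseed x hx hcx))
        htnd'
        (by
          intro k' hk' hmem
          rcases List.mem_append.1 hmem with h | h
          · exact hdone k' (List.mem_cons_of_mem _ hk') h
          · exact hne_k k' (List.mem_append_right _ hk') (List.mem_singleton.1 h))
      obtain ⟨fin, hfin⟩ := c8
      have hkinA : k ∈ (ks.foldl (fun acc k =>
          if 0 < (PySem.Set.diff (PySem.Set.ofList (d.getD k [])) acc.2.keys).length then acc
          else (PySem.Set.add acc.1 k, acc.2.insert k (pvFullA acc.2 (d.getD k []))))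
          (done ++ [k], t')).1 := by
        rw [hfin]
        exact List.mem_append_left _ (by simp)
      rw [hadd]
      refine ⟨c1, ?_, ?_, c4, c5, c6, ?_, ?_⟩
      · rw [c2, List.filter_cons_of_neg (by simpa using hkinA)]
      · simp only [List.length_append, List.length_cons, List.length_nil] at c3 ⊢
        omega
      · intro x hx
        rcases c7 x hx with h | h
        · rcases List.mem_append.1 h with h | h
          · exact Or.inl h
          · exact Or.inr (by simp [List.mem_singleton.1 h])
        · exact Or.inr (List.mem_cons_of_mem _ h)
      · exact ⟨k :: fin, by rw [hfin]; simp⟩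

-- ===== the lockstep simulation of the whole loop =====
theorem pvLoopSim (d : PySem.Dict String (List String)) (hnd : d.keys.Nodup) :
    ∀ (fuel : Nat) (dm : PySem.Dict String (List String)) (remaining : List String)
      (pending : PySem.Dict String Int) (t : PySem.Dict String (List String)),
    dm.items = remaining.map (fun k => (k, d.getD k [])) →
    remaining.Nodup →
    (∀ k ∈ remaining, d.contains k = true) →
    (∀ k ∈ remaining, k ∉ t.keys) →
    (∀ k ∈ remaining, pending.getD k 0 = pvCnt d t k) →
    (∀ x ∈ pvFlat d, d.contains x = false → x ∈ t.keys) →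
    t.keys.Nodup →
    pvLoopA fuel dm t = pvLoopB d (pvDepB d) fuel remaining pending t := by
  intro fuel
  induction fuel with
  | zero => intro dm remaining pending t _ _ _ _ _ _ _; rfl
  | succ fuel ih =>
    intro dm remaining pending t hitems hrnd hrkeys hrmem hrpend hseed htnd
    have hsz : dm.size = remaining.length := by
      show dm.items.length = _
      rw [hitems, List.length_map]
    rw [pvLoopA_succ, pvLoopB_succ, hsz]
    by_cases hemp : remaining.length = 0
    · rw [if_neg (by omega : ¬ 0 < remaining.length), if_neg (by omega : ¬ remaining.length ≠ 0)]
    · rw [if_pos (by omega : 0 < remaining.length), if_pos (by omega : remaining.length ≠ 0)]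
      -- A's round as a fold over the key list
      have hRA : pvRoundA t dm.items =
          remaining.foldl (fun acc k =>
            if 0 < (PySem.Set.diff (PySem.Set.ofList (d.getD k [])) acc.2.keys).length then acc
            else (PySem.Set.add acc.1 k, acc.2.insert k (pvFullA acc.2 (d.getD k []))))
          (([] : List String), t) := by
        unfold pvRoundA
        rw [hitems, List.foldl_map]
        rfl
      have hRB : pvRoundB d (pvDepB d) remaining pending t =
          remaining.foldl (fun acc src =>
            if acc.2.1.getD src 0 ≠ 0 then (acc.1 ++ [src], acc.2)
            else (acc.1,
                  ((pvDepB d).getD src []).foldl (fun pnd w => pnd.modify w 0 (· - 1)) acc.2.1,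
                  acc.2.2.insert src (pvFullA acc.2.2 (d.getD src []))))
          ([], pending, t) := rfl
      obtain ⟨c1, c2, c3, c4, c5, c6, c7, c8⟩ :=
        pvRoundSim d (pvDepB d) (fun src w => pv_mem_depB d hnd src w)
          (fun src => pv_depB_nodup d hnd src)
          remaining [] [] pending t
          (by simpa using hrnd) (by simpa using hrkeys) (by simpa using hrmem)
          (by simpa using hrpend) hseed htnd (fun k _ => List.not_mem_nil)
      rw [hRA, hRB]
      simp only [List.nil_append, List.length_nil] at c2 c3
      by_cases hfin : (remaining.foldl (fun acc k =>
          if 0 < (PySem.Set.diff (PySem.Set.ofList (d.getD k [])) acc.2.keys).length then acc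
          else (PySem.Set.add acc.1 k, acc.2.insert k (pvFullA acc.2 (d.getD k []))))
          (([] : List String), t)).1.length = 0
      · rw [if_pos hfin, if_neg (by omega)]
        exact c1
      · rw [if_neg hfin, if_pos (by omega)]
        -- set up the next round's invariants
        set rA := remaining.foldl (fun acc k =>
            if 0 < (PySem.Set.diff (PySem.Set.ofList (d.getD k [])) acc.2.keys).length then acc
            else (PySem.Set.add acc.1 k, acc.2.insert k (pvFullA acc.2 (d.getD k []))))
          (([] : List String), t) with hrA
        set rB := remaining.foldl (fun acc src =>
            if acc.2.1.getD src 0 ≠ 0 then (acc.1 ++ [src], acc.2)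
            else (acc.1,
                  ((pvDepB d).getD src []).foldl (fun pnd w => pnd.modify w 0 (· - 1)) acc.2.1,
                  acc.2.2.insert src (pvFullA acc.2.2 (d.getD src []))))
          (([] : List String), pending, t) with hrB
        have hsub : (remaining.filter (fun k => decide (k ∉ rA.1))).Sublist remaining :=
          List.filter_sublist
        have hitems' : (rA.1.foldl (fun dm' src => dm'.erase src) dm).items =
            rB.1.map (fun k => (k, d.getD k [])) := by
          rw [pv_items_foldl_erase, hitems, List.filter_map, c2]
          rfl
        rw [← c1]
        exact ih _ rB.1 rB.2.1 rA.2 hitems'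
          (by rw [c2]; exact hsub.nodup hrnd)
          (by
            intro k hk
            rw [c2] at hk
            exact hrkeys k (hsub.mem hk))
          (fun k hk => (c4 k hk).2)
          (fun k hk => (c4 k hk).1)
          c5 c6

-- ===== final assembly =====
theorem pv_main (dep_map : List (String × List String)) :
    maximize_dep_map_py dep_map = maximize_dep_map_py_alt dep_map := by
  set d := pvToDict dep_map with hd
  have hnd : d.keys.Nodup := pvToDict_keys_nodup dep_map
  show (pvLoopA d.size d (pvSeed d)).items =
    (pvLoopB d (pvInitB d).2 d.size d.keys (pvInitB d).1 (pvSeed d)).items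
  rw [pvInitB_eq]
  refine congrArg PySem.Dict.items ?_
  refine pvLoopSim d hnd d.size d d.keys (pvNpB d) (pvSeed d)
    (pv_items_eq_map d hnd) hnd
    (fun k hk => (PySem.Dict.contains_iff_mem_keys _ _).2 hk)
    ?_ ?_ ?_ (pvSeed_nodup d)
  · intro k hk hmem
    have h1 := (pvSeed_mem_keys d k).1 hmem
    have h2 := (PySem.Dict.contains_iff_mem_keys _ _).2 hk
    rw [h1.1] at h2
    cases h2
  · intro k hk
    obtain ⟨p, hp, hfst⟩ := List.mem_map.1 hk
    subst hfst
    rw [pvNpB_getD d hnd p hp]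
    unfold pvCnt
    rw [pv_item_getD d hnd p hp]
    refine congrArg _ (List.Perm.length_eq ?_)
    refine (List.perm_ext_iff_of_nodup (pv_inner_nodup d p.2)
      ((PySem.Set.nodup_ofList _).filter _)).2 ?_
    intro a
    rw [pv_mem_inner, List.mem_filter, PySem.Set.mem_ofList]
    constructor
    · rintro ⟨h1, h2⟩
      refine ⟨h1, ?_⟩
      simp only [decide_eq_true_eq]
      intro hmem
      have := (pvSeed_mem_keys d a).1 hmem
      rw [this.1] at h2
      cases h2
    · rintro ⟨h1, h2⟩
      refine ⟨h1, ?_⟩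
      by_contra hc
      simp only [decide_eq_true_eq] at h2
      exact h2 ((pvSeed_mem_keys d a).2 ⟨by simpa using hc, pv_mem_flat d p hp a h1⟩)
  · intro x hx hcx
    exact (pvSeed_mem_keys d x).2 ⟨hcx, hx⟩

-- ===== VERDICT (by name: the statement is the Claim_ definition above) =====
theorem maximize_dep_map_py_spec : Claim_equal_maximize_dep_map_py := by
  intro dep_map _ _
  exact pv_main dep_map
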